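-- pv_equiv track=rewrite | github.com/gredas/pp1 | 13-Test3/p1.py | f
-- ===== SOURCE A (Python) =====
-- def f(n):
--     string = ''
--     for x in range(1,n+1):
--         if x%5==0 and x!=1 and x!=n:
--             string = string + '/-'
--         else:
--             string = string + '/'
--     return string
-- ===== SOURCE B (Python) =====
-- def f(n):
--     if n < 1:
--         return ''
--     q, r = divmod(n, 5)
--     blocks = ['/' * 5] * q
--     if r:
--         blocks.append('/' * r)
--     return '-'.join(blocks)
-- ===== Notes on version B (the rewrite author's own statement) =====
-- stated objective: faster
-- what changed: Replaces the per-character loop with a range test by divmod arithmetic: build q five-slash blocks plus an optional remainder block and '-'.join them, avoiding A's repeated string concatenation.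
import Mathlib
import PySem

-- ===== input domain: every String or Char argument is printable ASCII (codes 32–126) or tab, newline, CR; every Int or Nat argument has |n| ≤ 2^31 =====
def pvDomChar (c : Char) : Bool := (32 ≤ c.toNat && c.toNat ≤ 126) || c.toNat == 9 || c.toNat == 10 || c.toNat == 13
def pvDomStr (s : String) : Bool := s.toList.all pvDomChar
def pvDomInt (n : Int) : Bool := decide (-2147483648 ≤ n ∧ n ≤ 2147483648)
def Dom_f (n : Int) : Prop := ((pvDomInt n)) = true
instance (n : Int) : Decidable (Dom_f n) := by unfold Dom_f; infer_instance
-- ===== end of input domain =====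

-- B replaces A's per-character loop by divmod block arithmetic joined with '-' (objective: faster, measured).

-- ===== PORT A =====
def f (n : Int) : String :=
  (PySem.List.pyRange 1 (n + 1) 1).foldl
    (fun s x =>
      if PySem.Int.mod x 5 == 0 && x != 1 && x != n then s ++ "/-" else s ++ "/")
    ""

-- ===== PORT B =====
def f_alt (n : Int) : String :=
  if n < 1 then "" else
    let q := PySem.Int.floordiv n 5
    let r := PySem.Int.mod n 5
    let blocks := PySem.List.pyRepeat ["/////"] q
    let blocks := if r != 0 then blocks ++ [String.ofList (List.replicate r.toNat '/')] else blocks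
    PySem.Str.join "-" blocks

-- ===== PRECONDITION & SPEC =====
def Spec_f (n : Int) (out : String) : Prop := out = f_alt n
instance (n : Int) (out : String) : Decidable (Spec_f n out) := by unfold Spec_f; infer_instance

-- ===== CLAIM (what is proved, stated in full; the proofs are below) =====
def Claim_equal_f : Prop := ∀ (n : Int), Dom_f n → Spec_f n (f n)

-- ===== LEMMAS AND PROOFS =====

-- the five-slash block and the block-plus-dash unit used by the closed form
def pvB5 : List Char := ['/', '/', '/', '/', '/']
def pvBd : List Char := ['/', '/', '/', '/', '/', '-']

-- A's loop at character level, with the range-independent condition x % 5 = 0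
def pvG : Nat → List Char
  | 0 => []
  | m + 1 => pvG m ++ (if (m + 1) % 5 == 0 then ['/', '-'] else ['/'])

def pvCore (q r : Nat) : List Char := (List.replicate q pvBd).flatten ++ List.replicate r '/'

lemma pv_fold_toList (p : Int → Bool) (l : List Int) (init : String) :
    (l.foldl (fun s x => if p x then s ++ "/-" else s ++ "/") init).toList
      = init.toList ++ l.flatMap (fun x => if p x then ['/', '-'] else ['/']) := by
  induction l generalizing init with
  | nil => simp
  | cons a l ih =>
    simp only [List.foldl_cons, List.flatMap_cons]
    by_cases h : p a = true <;> simp [h, ih]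

lemma pv_flatMap_range (m : Nat) :
    (PySem.List.pyRange 1 ((m : Int) + 1) 1).flatMap
        (fun x => if PySem.Int.mod x 5 == 0 then ['/', '-'] else ['/'])
      = pvG m := by
  induction m with
  | zero => simp [PySem.List.pyRange_one_eq_nil, pvG]
  | succ m ih =>
    rw [show ((m + 1 : Nat) : Int) + 1 = ((m : Int) + 1) + 1 by push_cast; ring,
        PySem.List.pyRange_one_succ_right (by omega)]
    rw [List.flatMap_append, ih]
    have hmod : PySem.Int.mod ((m : Int) + 1) 5 = (((m + 1) % 5 : Nat) : Int) := by
      rw [show ((m : Int) + 1) = ((m + 1 : Nat) : Int) by push_cast; ring]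
      exact PySem.Int.mod_natCast (m + 1) 5
    rw [show pvG (m + 1) = pvG m ++ (if (m + 1) % 5 == 0 then ['/', '-'] else ['/']) from rfl]
    by_cases h : (m + 1) % 5 = 0 <;>
      · simp only [List.flatMap_cons, List.flatMap_nil, List.append_nil, hmod]
        simp [h] <;> omega

lemma pvG_five (m : Nat) :
    pvG (m + 5) = pvG m
      ++ (if (m + 1) % 5 == 0 then ['/', '-'] else ['/'])
      ++ (if (m + 2) % 5 == 0 then ['/', '-'] else ['/'])
      ++ (if (m + 3) % 5 == 0 then ['/', '-'] else ['/'])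
      ++ (if (m + 4) % 5 == 0 then ['/', '-'] else ['/'])
      ++ (if (m + 5) % 5 == 0 then ['/', '-'] else ['/']) := by
  show pvG (m + 1 + 1 + 1 + 1 + 1) = _
  simp only [pvG]

lemma pvG_closed : ∀ q r, r < 5 → pvG (5 * q + r) = pvCore q r := by
  intro q
  induction q with
  | zero =>
    intro r hr
    interval_cases r <;> decide
  | succ q ih =>
    intro r hr
    rw [show 5 * (q + 1) + r = (5 * q + r) + 5 by ring, pvG_five, ih r hr]
    unfold pvCore
    rw [List.replicate_succ', List.flatten_append]
    interval_cases r <;>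
      simp [Nat.add_mod, Nat.mul_mod_right, pvBd, List.append_assoc, List.replicate]

lemma pv_join_step (l : List (List Char)) (hl : l ≠ []) :
    PySem.Chars.join ['-'] (pvB5 :: l) = pvBd ++ PySem.Chars.join ['-'] l := by
  cases l with
  | nil => exact absurd rfl hl
  | cons b l => rw [PySem.Chars.join_cons_cons]; rfl

lemma pv_join_tail (Q : Nat) (tail : List Char) :
    PySem.Chars.join ['-'] (List.replicate Q pvB5 ++ [tail])
      = (List.replicate Q pvBd).flatten ++ tail := by
  induction Q with
  | zero => simp [PySem.Chars.join_singleton]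
  | succ Q ih =>
    rw [List.replicate_succ, List.cons_append, pv_join_step _ (by simp), ih,
        List.replicate_succ, List.flatten_cons, List.append_assoc]

lemma pv_join_exact (Q : Nat) :
    PySem.Chars.join ['-'] (List.replicate (Q + 1) pvB5)
      = (List.replicate Q pvBd).flatten ++ pvB5 := by
  induction Q with
  | zero => simp [PySem.Chars.join_singleton]
  | succ Q ih =>
    rw [List.replicate_succ, pv_join_step _ (by simp), ih,
        List.replicate_succ, List.flatten_cons, List.append_assoc]

-- A's value at character level: pvG (n-1) followed by the final '/'
lemma pv_f_toList (n : Int) (hn : 1 ≤ n) :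
    (f n).toList = pvG (n - 1).toNat ++ ['/'] := by
  have hm : n = ((n - 1).toNat : Int) + 1 := by omega
  rw [f, pv_fold_toList]
  rw [PySem.List.pyRange_one_succ_right (by omega), List.flatMap_append]
  have hlast : List.flatMap (fun x => if PySem.Int.mod x 5 == 0 && x != 1 && x != n
      then ['/', '-'] else ['/']) [n] = ['/'] := by
    simp
  rw [hlast]
  have hcong : List.flatMap (fun x => if PySem.Int.mod x 5 == 0 && x != 1 && x != n
        then ['/', '-'] else ['/']) (PySem.List.pyRange 1 n 1)
      = List.flatMap (fun x => if PySem.Int.mod x 5 == 0 then ['/', '-'] else ['/'])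
        (PySem.List.pyRange 1 n 1) := by
    apply List.flatMap_congr
    intro x hx
    rw [PySem.List.mem_pyRange_one] at hx
    by_cases h5 : (5 : Int) ∣ x
    · have hx1 : x ≠ 1 := by rintro rfl; omega
      have hxn : x ≠ n := by omega
      simp [h5, hx1, hxn]
    · simp [h5]
  rw [hcong, show PySem.List.pyRange 1 n 1
        = PySem.List.pyRange 1 (((n - 1).toNat : Int) + 1) 1 by rw [← hm],
      pv_flatMap_range]
  simp

-- ===== VERDICT (by name: the statement is the Claim_ definition above) =====
theorem f_spec : Claim_equal_f := by
  unfold Claim_equal_f Spec_f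
  intro n _
  by_cases hn : n < 1
  · rw [f, f_alt, if_pos hn, PySem.List.pyRange_one_eq_nil (by omega)]
    rfl
  · rw [not_lt] at hn
    apply String.ext
    set N : Nat := n.toNat with hN
    have hn' : n = (N : Int) := by omega
    have hN1 : 1 ≤ N := by omega
    have hq : PySem.Int.floordiv n 5 = ((N / 5 : Nat) : Int) := by
      rw [hn']; exact_mod_cast PySem.Int.floordiv_natCast N 5
    have hr : PySem.Int.mod n 5 = ((N % 5 : Nat) : Int) := by
      rw [hn']; exact_mod_cast PySem.Int.mod_natCast N 5
    rw [pv_f_toList n (by omega), f_alt, if_neg (by omega)]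
    simp only [hq, hr, PySem.List.pyRepeat_singleton, Int.toNat_natCast]
    by_cases hR : N % 5 = 0
    · -- n a multiple of 5: q ≥ 1 blocks, no remainder block
      have hQ1 : 1 ≤ N / 5 := by omega
      have hm : (n - 1).toNat = 5 * (N / 5 - 1) + 4 := by omega
      rw [hm, pvG_closed _ 4 (by omega)]
      rw [if_neg (by simp [hR])]
      rw [PySem.Str.toList_join, List.map_replicate,
          show ("/////" : String).toList = pvB5 from by decide,
          show ("-" : String).toList = ['-'] from by decide,
          show N / 5 = (N / 5 - 1) + 1 by omega, pv_join_exact]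
      simp [pvCore, List.append_assoc, pvB5, List.replicate]
    · -- remainder block of N % 5 slashes
      have hm : (n - 1).toNat = 5 * (N / 5) + (N % 5 - 1) := by omega
      rw [hm, pvG_closed _ _ (by omega)]
      rw [if_pos (by simp; omega)]
      rw [PySem.Str.toList_join, List.map_append, List.map_replicate,
          show ("/////" : String).toList = pvB5 from by decide,
          show ("-" : String).toList = ['-'] from by decide,
          List.map_singleton, String.toList_ofList, pv_join_tail]
      rw [show N % 5 = (N % 5 - 1) + 1 by omega, List.replicate_succ']
      simp [pvCore, List.append_assoc]
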